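-- pv_equiv track=rewrite | github.com/nirbar8/text_to_image_retriever | src/retriever/components/tiles_db/cli.py | _format_counts
-- ===== SOURCE A (Python) =====
-- from typing import Iterable, List
--
-- def _format_counts(counts: dict[str, int]) -> List[str]:
--     preferred = [
--         "waiting for embedding",
--         "waiting for index",
--         "indexed",
--         "failed",
--         "",
--     ]
--     lines: List[str] = []
--     for status in preferred:
--         if status in counts:
--             label = status or "<empty>"
--             lines.append(f"{label}: {counts[status]}")
--     for status in sorted(k for k in counts.keys() if k not in preferred):
--         lines.append(f"{status}: {counts[status]}")
--     return lines
-- ===== SOURCE B (Python) =====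
-- from typing import List
--
-- def _format_counts(counts: dict[str, int]) -> List[str]:
--     preferred = [
--         "waiting for embedding",
--         "waiting for index",
--         "indexed",
--         "failed",
--         "",
--     ]
--
--     def rank(k: str):
--         return (preferred.index(k) if k in preferred else len(preferred), k)
--
--     return [f"{k or '<empty>'}: {counts[k]}" for k in sorted(counts, key=rank)]
-- ===== Notes on version B (the rewrite author's own statement) =====
-- stated objective: idiomatic
-- what changed: Replaces A's two separate emission passes (fixed preferred-order loop plus a sorted-remainder loop) with one composite-keyed sort of all keys (rank in preferred list, then name) followed by a single formatting comprehension.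
import Mathlib
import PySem

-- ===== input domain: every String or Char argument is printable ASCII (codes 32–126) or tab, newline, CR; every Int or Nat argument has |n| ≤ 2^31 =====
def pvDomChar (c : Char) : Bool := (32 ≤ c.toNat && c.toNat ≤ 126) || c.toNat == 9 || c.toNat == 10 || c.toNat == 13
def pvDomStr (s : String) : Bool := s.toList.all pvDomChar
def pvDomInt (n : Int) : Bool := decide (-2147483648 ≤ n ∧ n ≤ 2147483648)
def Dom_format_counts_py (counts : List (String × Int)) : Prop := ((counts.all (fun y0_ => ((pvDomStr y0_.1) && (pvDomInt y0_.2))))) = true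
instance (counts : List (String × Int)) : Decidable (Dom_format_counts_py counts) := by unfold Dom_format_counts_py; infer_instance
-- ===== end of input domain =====

-- B replaces A's two emission passes (preferred-order loop + sorted-remainder loop) by one
-- composite-keyed sort of all keys followed by a single formatting pass (objective: idiomatic).
-- The Python dict parameter arrives here as an association list; both ports first build the
-- dict with PySem.Dict.ofList (Python's dict(...) semantics: last value wins, first position kept).

-- ===== PORT A =====
def pvPreferred : List String :=
  ["waiting for embedding", "waiting for index", "indexed", "failed", ""]

def format_counts_py (counts : List (String × Int)) : List String :=
  let d := PySem.Dict.ofList counts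
  -- first loop: for status in preferred: if status in counts: lines.append(f"{label}: {counts[status]}")
  -- (counts[status] is guarded by the membership test, so d.getD status 0 is exact here)
  let lines := pvPreferred.foldl (fun lines status =>
    if d.contains status then
      lines ++ [(if status == "" then "<empty>" else status) ++ ": " ++ PySem.Int.toStr (d.getD status 0)]
    else lines) ([] : List String)
  -- second loop: for status in sorted(k for k in counts.keys() if k not in preferred): ...
  (PySem.List.sorted (d.keys.filter (fun k => !(pvPreferred.contains k))) (fun k => k) false).foldl
    (fun lines status => lines ++ [status ++ ": " ++ PySem.Int.toStr (d.getD status 0)]) lines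

-- ===== PORT B =====
-- rank(k) = (preferred.index(k) if k in preferred else len(preferred), k); sorted2 is the tuple-keyed sort
def pvRank (k : String) : Int :=
  if pvPreferred.contains k then (((PySem.List.index? pvPreferred k).getD 0 : Nat) : Int)
  else (pvPreferred.length : Int)

def format_counts_py_alt (counts : List (String × Int)) : List String :=
  let d := PySem.Dict.ofList counts
  (PySem.List.sorted2 d.keys pvRank (fun k => k) false).map
    (fun k => (if k == "" then "<empty>" else k) ++ ": " ++ PySem.Int.toStr (d.getD k 0))

-- ===== PRECONDITION & SPEC =====
def Spec_format_counts_py (counts : List (String × Int)) (out : List String) : Prop := out = format_counts_py_alt counts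
instance (counts : List (String × Int)) (out : List String) : Decidable (Spec_format_counts_py counts out) := by unfold Spec_format_counts_py; infer_instance

-- ===== CLAIM (what is proved, stated in full; the proofs are below) =====
def Claim_equal_format_counts_py : Prop := ∀ (counts : List (String × Int)), Dom_format_counts_py counts → Spec_format_counts_py counts (format_counts_py counts)

-- ===== LEMMAS AND PROOFS =====

-- the composite sort key of B, packaged as one lexicographic key
def pvKey (k : String) : Lex (Int × String) := toLex (pvRank k, k)

-- B's tuple-keyed sorted2 is the plain sort by the lexicographic key pvKey
theorem pv_sorted2_eq_sorted_key (xs : List String) :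
    PySem.List.sorted2 xs pvRank (fun k => k) false = PySem.List.sorted xs pvKey false := by
  have hfn : (fun (a b : String) => decide (pvRank a < pvRank b) || (!decide (pvRank b < pvRank a) && decide (a < b)))
      = (fun (a b : String) => decide (pvKey a < pvKey b)) := by
    funext a b
    by_cases h1 : pvRank a < pvRank b
    · simp [h1, pvKey, Prod.Lex.lt_iff]
    · by_cases h2 : pvRank b < pvRank a
      · simp [pvKey, Prod.Lex.lt_iff, h1]
        simp [h2, ne_of_gt h2]

      · simp [pvKey, Prod.Lex.lt_iff, le_antisymm (not_lt.1 h2) (not_lt.1 h1)]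
  show List.foldl (fun acc x => PySem.List.insertBy
      (fun (a b : String) => decide (pvRank a < pvRank b) || (!decide (pvRank b < pvRank a) && decide (a < b))) x acc) [] xs
    = List.foldl (fun acc x => PySem.List.insertBy
      (fun (a b : String) => decide (pvKey a < pvKey b)) x acc) [] xs
  rw [hfn]

theorem pvRank_lt_of_mem {a : String} (h : a ∈ pvPreferred) : pvRank a < 5 := by
  fin_cases h <;> decide

theorem pvRank_eq_of_not_mem {a : String} (h : a ∉ pvPreferred) : pvRank a = 5 := by
  have hc : pvPreferred.contains a = false := by
    rw [← Bool.not_eq_true, List.contains_iff_mem]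
    simpa using h
  simp only [pvRank, hc, Bool.false_eq_true, if_false]
  decide

theorem pvPreferred_pairwise_rank : pvPreferred.Pairwise (fun a b => pvRank a < pvRank b) := by
  decide

-- the heart of the proof: one keyed sort of all keys = preferred-filter pass ++ sorted rest
theorem pv_sorted_key_split (keys : List String) (hnd : keys.Nodup) (p : String → Bool)
    (hp : ∀ k, p k = true ↔ k ∈ keys) :
    PySem.List.sorted2 keys pvRank (fun k => k) false
      = pvPreferred.filter p
        ++ PySem.List.sorted (keys.filter (fun k => !(pvPreferred.contains k))) (fun k => k) false := by
  rw [pv_sorted2_eq_sorted_key]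
  set rest := keys.filter (fun k => !(pvPreferred.contains k)) with hrest
  set srest := PySem.List.sorted rest (fun k => k) false with hsrest
  have hndP : pvPreferred.Nodup := by decide
  have hsp : srest.Perm rest := PySem.List.sorted_perm _ _ _
  -- membership facts
  have hmem_srest : ∀ k ∈ srest, k ∉ pvPreferred := by
    intro k hk
    have : k ∈ rest := hsp.mem_iff.1 hk
    simp [hrest, List.mem_filter] at this
    simpa using this.2
  have hmem_filtP : ∀ a ∈ pvPreferred.filter p, a ∈ pvPreferred := fun a ha => (List.mem_filter.1 ha).1
  apply PySem.List.sorted_eq_of_perm_of_pairwise_lt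
  · -- permutation
    have h1 : (pvPreferred.filter p).Perm (keys.filter (fun k => pvPreferred.contains k)) := by
      refine (List.perm_ext_iff_of_nodup (hndP.filter p) (hnd.filter _)).2 ?_
      intro a
      simp only [List.mem_filter, hp, List.contains_iff_mem]
      tauto
    have h2 : (keys.filter (fun k => pvPreferred.contains k) ++ rest).Perm keys := by
      simpa [hrest] using List.filter_append_perm (fun k => pvPreferred.contains k) keys
    exact (h1.append hsp).trans h2
  · -- pairwise strictly increasing under pvKey
    rw [List.pairwise_append]
    refine ⟨?_, ?_, ?_⟩
    · -- within the preferred part: ranks strictly increase along pvPreferred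
      have := List.Pairwise.sublist (List.filter_sublist (p := p)) pvPreferred_pairwise_rank
      exact this.imp (fun h => by simp [pvKey, Prod.Lex.lt_iff]; omega)
    · -- within the sorted rest: all ranks are 5, names strictly increase
      have hle : srest.Pairwise (fun a b => a ≤ b) := PySem.List.sorted_pairwise rest _
      have hndr : srest.Nodup := (hsp.nodup_iff).2 (hnd.filter _)
      have hlt : srest.Pairwise (fun a b => a < b) :=
        (hle.and hndr).imp (fun h => lt_of_le_of_ne h.1 h.2)
      refine hlt.imp_of_mem ?_
      intro a b ha hb hab
      have h5a : pvRank a = 5 := pvRank_eq_of_not_mem (hmem_srest a ha)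
      have h5b : pvRank b = 5 := pvRank_eq_of_not_mem (hmem_srest b hb)
      simp [pvKey, Prod.Lex.lt_iff, h5a, h5b, hab]
    · -- across: preferred ranks < 5 = rest ranks
      intro a ha b hb
      have h1 : pvRank a < 5 := pvRank_lt_of_mem (hmem_filtP a ha)
      have h2 : pvRank b = 5 := pvRank_eq_of_not_mem (hmem_srest b hb)
      simp [pvKey, Prod.Lex.lt_iff]
      omega

-- ===== VERDICT (by name: the statement is the Claim_ definition above) =====
theorem format_counts_py_spec : Claim_equal_format_counts_py := by
  intro counts _
  unfold Spec_format_counts_py format_counts_py format_counts_py_alt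
  simp only []
  set d := PySem.Dict.ofList counts with hd
  have hnd : d.keys.Nodup := PySem.Dict.nodup_keys_ofList counts
  set fmt := fun (k : String) => (if k == "" then "<empty>" else k) ++ ": " ++ PySem.Int.toStr (d.getD k 0) with hfmt
  set rest := d.keys.filter (fun k => !(pvPreferred.contains k)) with hrest
  set srest := PySem.List.sorted rest (fun k => k) false with hsrest
  -- A's two loops, as filter-map and map
  rw [PySem.List.foldl_append_if (p := fun s => d.contains s) (f := fmt)]
  rw [PySem.List.foldl_append_singleton_eq_map]
  -- B's single sort, split
  rw [pv_sorted_key_split d.keys hnd (fun s => d.contains s)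
        (fun k => PySem.Dict.contains_iff_mem_keys d k)]
  rw [List.map_append, List.nil_append]
  congr 1
  -- on the non-preferred part the "<empty>" relabel never fires (the empty key is preferred)
  apply List.map_congr_left
  intro k hk
  have hkr : k ∈ rest := (PySem.List.sorted_perm rest _ _).mem_iff.1 hk
  have : ¬ (k ∈ pvPreferred) := by
    have := (List.mem_filter.1 hkr).2
    simpa using this
  have hkne : k ≠ "" := fun hke => this (by rw [hke]; decide)
  simp [hfmt, hkne]
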